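-- pv_equiv track=rewrite | github.com/winok2/Hospital-Documentation-Funding-Integrity-Dashboard | core/mapping.py | find_missing_concepts
-- ===== SOURCE A (Python) =====
-- from typing import Dict, List, Set
--
-- CONCEPT_TO_ICD_PREFIX: Dict[str, List[str]] = {
--     "Heart Failure":                ["I50"],
--     "Acute MI":                     ["I21", "I22"],
--     "Atrial Fibrillation":          ["I48"],
--     "Hypertension":                 ["I10", "I11", "I12", "I13"],
--     "Coronary Artery Disease":      ["I25"],
--     "Pneumonia":                    ["J18", "J15", "J13", "J12"],
--     "COPD":                         ["J44", "J43"],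
--     "Respiratory Failure":          ["J96"],
--     "Pulmonary Embolism":           ["I26"],
--     "Diabetes Type 2":              ["E11"],
--     "Diabetes Type 1":              ["E10"],
--     "Hyperglycemia":                ["R73", "E11.65", "E10.65"],
--     "Hypoglycemia":                 ["E16", "E11.64", "E10.64"],
--     "Sepsis":                       ["A41", "A40"],
--     "Acute Kidney Injury":          ["N17"],
--     "Chronic Kidney Disease":       ["N18"],
--     "Stroke":                       ["I63", "I61", "I64"],
--     "Altered Mental Status":        ["R41", "G93.4", "F05"],
--     "Seizure":                      ["G40", "R56"],
--     "Post-Operative Complication":  ["T81"],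
--     "DVT":                          ["I82"],
--     "Anemia":                       ["D50", "D51", "D52", "D53", "D64"],
--     "Malnutrition":                 ["E40", "E41", "E42", "E43", "E44", "E46"],
--     "Pressure Ulcer":               ["L89"],
--     "Major Complication":           ["T80", "T81", "T82"],
--     "Multi-organ Dysfunction":      ["R65"],
--     "Morbid Obesity":               ["E66"],
-- }
--
-- def find_missing_concepts(concepts: List[str], icd_codes_str: str) -> List[str]:
--     """
--     Given extracted concepts and documented ICD codes,
--     return which concepts are NOT covered by any documented code.
--     """
--     if not icd_codes_str:
--         return concepts[:]
--
--     # Normalize documented codes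
--     documented = [c.strip().upper() for c in icd_codes_str.split(";") if c.strip()]
--
--     missing = []
--     for concept in concepts:
--         expected_prefixes = CONCEPT_TO_ICD_PREFIX.get(concept, [])
--         if not expected_prefixes:
--             continue
--         covered = any(
--             any(doc.startswith(prefix.upper()) for prefix in expected_prefixes)
--             for doc in documented
--         )
--         if not covered:
--             missing.append(concept)
--
--     return missing
-- ===== SOURCE B (Python) =====
-- from typing import List
--
-- # The concept <-> ICD-prefix mapping as compact "PREFIX PREFIX ...:Concept"
-- # config entries, parsed once at load time into an inverted index prefix -> concepts.
-- _RAW = [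
--     "I50:Heart Failure",
--     "I21 I22:Acute MI",
--     "I48:Atrial Fibrillation",
--     "I10 I11 I12 I13:Hypertension",
--     "I25:Coronary Artery Disease",
--     "J18 J15 J13 J12:Pneumonia",
--     "J44 J43:COPD",
--     "J96:Respiratory Failure",
--     "I26:Pulmonary Embolism",
--     "E11:Diabetes Type 2",
--     "E10:Diabetes Type 1",
--     "R73 E11.65 E10.65:Hyperglycemia",
--     "E16 E11.64 E10.64:Hypoglycemia",
--     "A41 A40:Sepsis",
--     "N17:Acute Kidney Injury",
--     "N18:Chronic Kidney Disease",
--     "I63 I61 I64:Stroke",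
--     "R41 G93.4 F05:Altered Mental Status",
--     "G40 R56:Seizure",
--     "T81:Post-Operative Complication",
--     "I82:DVT",
--     "D50 D51 D52 D53 D64:Anemia",
--     "E40 E41 E42 E43 E44 E46:Malnutrition",
--     "L89:Pressure Ulcer",
--     "T80 T81 T82:Major Complication",
--     "R65:Multi-organ Dysfunction",
--     "E66:Morbid Obesity",
-- ]
--
-- _PAIRS = [(p, e[e.find(":") + 1:]) for e in _RAW for p in e[:e.find(":")].split(" ")]
-- _LENGTHS = sorted({len(p) for p, _ in _PAIRS})
-- _INDEX = {}
-- for _p, _n in _PAIRS: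
--     _INDEX.setdefault(_p, []).append(_n)
-- _KNOWN = {n for _, n in _PAIRS}
--
--
-- def find_missing_concepts(concepts: List[str], icd_codes_str: str) -> List[str]:
--     """Return concepts NOT covered by any documented ICD code (inverted-index lookup)."""
--     if not icd_codes_str:
--         return concepts[:]
--
--     covered = set()
--     for chunk in icd_codes_str.split(";"):
--         code = chunk.strip().upper()
--         if code:
--             for length in _LENGTHS:
--                 for name in _INDEX.get(code[:length], ()):
--                     covered.add(name)
--
--     return [c for c in concepts if c in _KNOWN and c not in covered]
-- ===== Notes on version B (the rewrite author's own statement) =====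
-- stated objective: alternative
-- what changed: A rescans every documented code per input concept with nested any/any startswith over a concept->prefixes dict; B parses a compact prefix:concept config into an inverted prefix->concepts index once, builds a covered set by dict lookups on each documented code's head of each prefix length, then filters the input concepts against that set.
import Mathlib
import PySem

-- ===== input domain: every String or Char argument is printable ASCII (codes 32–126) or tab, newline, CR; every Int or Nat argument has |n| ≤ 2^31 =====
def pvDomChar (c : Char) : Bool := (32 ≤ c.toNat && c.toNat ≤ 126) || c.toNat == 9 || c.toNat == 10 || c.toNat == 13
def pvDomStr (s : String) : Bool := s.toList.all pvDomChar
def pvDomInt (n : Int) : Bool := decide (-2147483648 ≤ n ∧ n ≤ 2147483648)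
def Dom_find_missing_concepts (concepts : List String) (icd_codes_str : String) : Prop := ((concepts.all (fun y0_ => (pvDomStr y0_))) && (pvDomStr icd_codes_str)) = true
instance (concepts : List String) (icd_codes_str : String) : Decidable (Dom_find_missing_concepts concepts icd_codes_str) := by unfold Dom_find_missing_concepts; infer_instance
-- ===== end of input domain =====

-- B replaces A's per-concept startswith rescans over a concept->prefixes dict by an
-- inverted prefix->concepts index (parsed once from a compact config string) consulted
-- by dict lookups on each documented code's length-3/5/6 head (objective: alternative).

-- ===== PORT A =====
-- A's module constant CONCEPT_TO_ICD_PREFIX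
def CONCEPT_TO_ICD_PREFIX : PySem.Dict String (List String) := PySem.Dict.ofList [
  ("Heart Failure",                ["I50"]),
  ("Acute MI",                     ["I21", "I22"]),
  ("Atrial Fibrillation",          ["I48"]),
  ("Hypertension",                 ["I10", "I11", "I12", "I13"]),
  ("Coronary Artery Disease",      ["I25"]),
  ("Pneumonia",                    ["J18", "J15", "J13", "J12"]),
  ("COPD",                         ["J44", "J43"]),
  ("Respiratory Failure",          ["J96"]),
  ("Pulmonary Embolism",           ["I26"]),
  ("Diabetes Type 2",              ["E11"]),
  ("Diabetes Type 1",              ["E10"]),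
  ("Hyperglycemia",                ["R73", "E11.65", "E10.65"]),
  ("Hypoglycemia",                 ["E16", "E11.64", "E10.64"]),
  ("Sepsis",                       ["A41", "A40"]),
  ("Acute Kidney Injury",          ["N17"]),
  ("Chronic Kidney Disease",       ["N18"]),
  ("Stroke",                       ["I63", "I61", "I64"]),
  ("Altered Mental Status",        ["R41", "G93.4", "F05"]),
  ("Seizure",                      ["G40", "R56"]),
  ("Post-Operative Complication",  ["T81"]),
  ("DVT",                          ["I82"]),
  ("Anemia",                       ["D50", "D51", "D52", "D53", "D64"]),
  ("Malnutrition",                 ["E40", "E41", "E42", "E43", "E44", "E46"]),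
  ("Pressure Ulcer",               ["L89"]),
  ("Major Complication",           ["T80", "T81", "T82"]),
  ("Multi-organ Dysfunction",      ["R65"]),
  ("Morbid Obesity",               ["E66"])]

-- '[c.strip().upper() for c in icd_codes_str.split(";") if c.strip()]'
def pvNormalize (s : String) : List String :=
  (((PySem.Str.split? s ";").getD []).filter (fun c => !(PySem.Str.strip c == ""))).map
    (fun c => PySem.Str.upper (PySem.Str.strip c))

-- 'any(doc.startswith(prefix.upper()) for prefix in expected_prefixes)'
def pvHit (prefixes : List String) (doc : String) : Bool :=
  prefixes.any (fun p => PySem.Str.startswith doc (PySem.Str.upper p))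

-- the body of A's 'for concept in concepts' loop
def stepA (documented : List String) (missing : List String) (concept : String) : List String :=
  let expected_prefixes := PySem.Dict.getD CONCEPT_TO_ICD_PREFIX concept []
  if expected_prefixes = [] then missing
  else
    let covered := documented.any (fun doc => pvHit expected_prefixes doc)
    if !covered then missing ++ [concept] else missing

def find_missing_concepts (concepts : List String) (icd_codes_str : String) : List String :=
  if icd_codes_str = "" then concepts
  else
    let documented := pvNormalize icd_codes_str
    concepts.foldl (stepA documented) []

-- ===== PORT B =====
-- Source B's _RAW config entries "PREFIX PREFIX ...:Concept"
def pvRaw : List String := ["I50:Heart Failure",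
  "I21 I22:Acute MI",
  "I48:Atrial Fibrillation",
  "I10 I11 I12 I13:Hypertension",
  "I25:Coronary Artery Disease",
  "J18 J15 J13 J12:Pneumonia",
  "J44 J43:COPD",
  "J96:Respiratory Failure",
  "I26:Pulmonary Embolism",
  "E11:Diabetes Type 2",
  "E10:Diabetes Type 1",
  "R73 E11.65 E10.65:Hyperglycemia",
  "E16 E11.64 E10.64:Hypoglycemia",
  "A41 A40:Sepsis",
  "N17:Acute Kidney Injury",
  "N18:Chronic Kidney Disease",
  "I63 I61 I64:Stroke",
  "R41 G93.4 F05:Altered Mental Status",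
  "G40 R56:Seizure",
  "T81:Post-Operative Complication",
  "I82:DVT",
  "D50 D51 D52 D53 D64:Anemia",
  "E40 E41 E42 E43 E44 E46:Malnutrition",
  "L89:Pressure Ulcer",
  "T80 T81 T82:Major Complication",
  "R65:Multi-organ Dysfunction",
  "E66:Morbid Obesity"]

-- _PAIRS = [(p, e[e.find(":") + 1:]) for e in _RAW for p in e[:e.find(":")].split(" ")]
def pvPairs : List (String × String) :=
  pvRaw.flatMap (fun e =>
    ((PySem.Str.split? (PySem.Str.slice e none (some (PySem.Str.find e ":"))) " ").getD []).map
      (fun p => (p, PySem.Str.slice e (some (PySem.Str.find e ":" + 1)) none)))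

-- _LENGTHS = sorted({len(p) for p, _ in _PAIRS})
def pvLengths : List Int :=
  PySem.List.sorted (PySem.Set.ofList (pvPairs.map (fun pc => PySem.Str.len pc.1))) (fun x => x) false

-- _INDEX.setdefault(_p, []).append(_n) over _PAIRS  (= d[p] = d.get(p, []) + [n])
def pvIndex : PySem.Dict String (List String) :=
  pvPairs.foldl (fun d pc => PySem.Dict.modify d pc.1 [] (fun v => v ++ [pc.2])) PySem.Dict.empty

-- _KNOWN = {n for _, n in _PAIRS}
def pvKnown : PySem.Set String := PySem.Set.ofList (pvPairs.map (fun pc => pc.2))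

def find_missing_concepts_alt (concepts : List String) (icd_codes_str : String) : List String :=
  if icd_codes_str = "" then concepts
  else
    let covered : PySem.Set String :=
      ((PySem.Str.split? icd_codes_str ";").getD []).foldl (fun cov chunk =>
        let code := PySem.Str.upper (PySem.Str.strip chunk)
        if code = "" then cov
        else pvLengths.foldl (fun cov L =>
          (PySem.Dict.getD pvIndex (PySem.Str.slice code none (some L)) []).foldl
            (fun cov name => PySem.Set.add cov name) cov) cov) PySem.Set.empty
    concepts.filter (fun c =>
      PySem.Set.contains pvKnown c && !(PySem.Set.contains covered c))

-- ===== PRECONDITION & SPEC =====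
def Spec_find_missing_concepts (concepts : List String) (icd_codes_str : String) (out : List String) : Prop := out = find_missing_concepts_alt concepts icd_codes_str
instance (concepts : List String) (icd_codes_str : String) (out : List String) : Decidable (Spec_find_missing_concepts concepts icd_codes_str out) := by unfold Spec_find_missing_concepts; infer_instance

-- ===== CLAIM (what is proved, stated in full; the proofs are below) =====
def Claim_equal_find_missing_concepts : Prop := ∀ (concepts : List String) (icd_codes_str : String), Dom_find_missing_concepts concepts icd_codes_str → Spec_find_missing_concepts concepts icd_codes_str (find_missing_concepts concepts icd_codes_str)

-- ===== LEMMAS AND PROOFS =====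

-- strings are equal iff their character lists are
theorem pv_str_ext (s t : String) (h : s.toList = t.toList) : s = t :=
  String.toList_inj.mp h

-- Set.contains is decidable membership
theorem pv_contains_eq (s : PySem.Set String) (x : String) :
    PySem.Set.contains s x = decide (x ∈ s) := by
  simp [PySem.Set.contains]

-- pvPairs and pvLengths, evaluated once to literals (proof helpers)
def pvPairsLit : List (String × String) := [
  ("I50", "Heart Failure"),
  ("I21", "Acute MI"),
  ("I22", "Acute MI"),
  ("I48", "Atrial Fibrillation"),
  ("I10", "Hypertension"),
  ("I11", "Hypertension"),
  ("I12", "Hypertension"),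
  ("I13", "Hypertension"),
  ("I25", "Coronary Artery Disease"),
  ("J18", "Pneumonia"),
  ("J15", "Pneumonia"),
  ("J13", "Pneumonia"),
  ("J12", "Pneumonia"),
  ("J44", "COPD"),
  ("J43", "COPD"),
  ("J96", "Respiratory Failure"),
  ("I26", "Pulmonary Embolism"),
  ("E11", "Diabetes Type 2"),
  ("E10", "Diabetes Type 1"),
  ("R73", "Hyperglycemia"),
  ("E11.65", "Hyperglycemia"),
  ("E10.65", "Hyperglycemia"),
  ("E16", "Hypoglycemia"),
  ("E11.64", "Hypoglycemia"),
  ("E10.64", "Hypoglycemia"),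
  ("A41", "Sepsis"),
  ("A40", "Sepsis"),
  ("N17", "Acute Kidney Injury"),
  ("N18", "Chronic Kidney Disease"),
  ("I63", "Stroke"),
  ("I61", "Stroke"),
  ("I64", "Stroke"),
  ("R41", "Altered Mental Status"),
  ("G93.4", "Altered Mental Status"),
  ("F05", "Altered Mental Status"),
  ("G40", "Seizure"),
  ("R56", "Seizure"),
  ("T81", "Post-Operative Complication"),
  ("I82", "DVT"),
  ("D50", "Anemia"),
  ("D51", "Anemia"),
  ("D52", "Anemia"),
  ("D53", "Anemia"),
  ("D64", "Anemia"),
  ("E40", "Malnutrition"),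
  ("E41", "Malnutrition"),
  ("E42", "Malnutrition"),
  ("E43", "Malnutrition"),
  ("E44", "Malnutrition"),
  ("E46", "Malnutrition"),
  ("L89", "Pressure Ulcer"),
  ("T80", "Major Complication"),
  ("T81", "Major Complication"),
  ("T82", "Major Complication"),
  ("R65", "Multi-organ Dysfunction"),
  ("E66", "Morbid Obesity")]

set_option maxRecDepth 100000 in
set_option maxHeartbeats 8000000 in
theorem pvPairs_eq : pvPairs = pvPairsLit := by decide

set_option maxRecDepth 100000 in
theorem pvLengths_eq : pvLengths = [3, 5, 6] := by
  unfold pvLengths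
  rw [pvPairs_eq]
  decide

-- every table entry has a non-empty prefix list
set_option maxRecDepth 100000 in
theorem factNonempty : ∀ np ∈ (PySem.Dict.items CONCEPT_TO_ICD_PREFIX), np.2 ≠ [] := by decide

-- every (concept, prefix) of the table appears uppercased in pvPairs
set_option maxRecDepth 100000 in
theorem factFwd : ∀ np ∈ (PySem.Dict.items CONCEPT_TO_ICD_PREFIX), ∀ p ∈ np.2,
    (PySem.Str.upper p, np.1) ∈ pvPairs := by
  rw [pvPairs_eq]; decide

-- every pvPairs entry comes from the table
set_option maxRecDepth 100000 in
theorem factBwd : ∀ qc ∈ pvPairs, ∃ np ∈ (PySem.Dict.items CONCEPT_TO_ICD_PREFIX),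
    np.1 = qc.2 ∧ ∃ p ∈ np.2, PySem.Str.upper p = qc.1 := by
  rw [pvPairs_eq]; decide

-- every index key's length is listed in pvLengths
set_option maxRecDepth 100000 in
theorem factLen : ∀ qc ∈ pvPairs, PySem.Str.len qc.1 ∈ pvLengths := by
  rw [pvPairs_eq, pvLengths_eq]; decide

theorem tableKeysNodup : (PySem.Dict.keys CONCEPT_TO_ICD_PREFIX).Nodup :=
  PySem.Dict.nodup_keys_ofList _

-- upper of a string is empty iff the string is
theorem pv_upper_eq_empty (s : String) : PySem.Str.upper s = "" ↔ s = "" := by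
  constructor
  · intro h
    apply pv_str_ext
    have := congrArg String.toList h
    simp only [PySem.Str.toList_upper, PySem.Chars.upper] at this
    simp only [String.toList_empty, List.map_eq_nil_iff] at this ⊢
    exact this
  · intro h; subst h; rfl

-- startswith gives back the prefix as a head slice
theorem pv_sw_slice (s q : String) (h : PySem.Str.startswith s q = true) :
    PySem.Str.slice s none (some (PySem.Str.len q)) = q := by
  apply pv_str_ext
  have hpre : q.toList <+: s.toList := by
    rw [PySem.Str.startswith_eq] at h
    exact (PySem.Chars.startswith_iff _ _).mp h
  have hlen : PySem.Str.len q = (q.toList.length : Int) := by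
    simp [PySem.Str.len]
  rw [PySem.Str.toList_slice, PySem.Chars.slice_eq_listSlice, hlen,
    PySem.List.slice_to _ (by positivity), Int.toNat_natCast]
  exact (List.prefix_iff_eq_take.mp hpre).symm

-- a head slice is a prefix
theorem pv_slice_sw (s : String) (L : Int) (hL : 0 ≤ L) :
    PySem.Str.startswith s (PySem.Str.slice s none (some L)) = true := by
  rw [PySem.Str.startswith_eq, PySem.Chars.startswith_iff,
    PySem.Str.toList_slice, PySem.Chars.slice_eq_listSlice, PySem.List.slice_to _ hL]
  exact List.take_prefix _ _

-- index lookups are pvPairs membership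
theorem pv_mem_index (q c : String) :
    c ∈ PySem.Dict.getD pvIndex q [] ↔ (q, c) ∈ pvPairs := by
  unfold pvIndex
  rw [PySem.Dict.getD_foldl_modify_append, PySem.Dict.getD_empty, List.nil_append]
  simp only [List.mem_map, List.mem_filter, beq_iff_eq]
  constructor
  · rintro ⟨⟨q', c'⟩, ⟨hm, rfl⟩, rfl⟩
    exact hm
  · intro hm
    exact ⟨(q, c), ⟨hm, rfl⟩, rfl⟩

-- membership through the innermost 'for name in …: covered.add(name)' fold
theorem pv_mem_add_fold (names : List String) (cov : List String) (c : String) :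
    c ∈ names.foldl (fun cov name => PySem.Set.add cov name) cov ↔ c ∈ cov ∨ c ∈ names := by
  induction names generalizing cov with
  | nil => simp
  | cons n ns ih => simp [ih, PySem.Set.mem_add, or_assoc]

-- membership through the 'for length in _LENGTHS' fold
theorem pv_mem_len_fold (code : String) (ls : List Int) (cov : List String) (c : String) :
    c ∈ ls.foldl (fun cov L =>
        (PySem.Dict.getD pvIndex (PySem.Str.slice code none (some L)) []).foldl
          (fun cov name => PySem.Set.add cov name) cov) cov ↔
      c ∈ cov ∨ ∃ L ∈ ls, c ∈ PySem.Dict.getD pvIndex (PySem.Str.slice code none (some L)) [] := by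
  induction ls generalizing cov with
  | nil => simp
  | cons l ls ih =>
    rw [List.foldl_cons, ih, pv_mem_add_fold]
    simp only [List.mem_cons]
    constructor
    · rintro ((hc | hm) | ⟨L, hL, hm⟩)
      · exact Or.inl hc
      · exact Or.inr ⟨l, Or.inl rfl, hm⟩
      · exact Or.inr ⟨L, Or.inr hL, hm⟩
    · rintro (hc | ⟨L, (rfl | hL), hm⟩)
      · exact Or.inl (Or.inl hc)
      · exact Or.inl (Or.inr hm)
      · exact Or.inr ⟨L, hL, hm⟩

-- membership through the outer 'for chunk in icd_codes_str.split(";")' fold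
theorem pv_mem_chunk_fold (chunks : List String) (cov : List String) (c : String) :
    c ∈ chunks.foldl (fun cov chunk =>
        if PySem.Str.upper (PySem.Str.strip chunk) = "" then cov
        else pvLengths.foldl (fun cov L =>
          (PySem.Dict.getD pvIndex
            (PySem.Str.slice (PySem.Str.upper (PySem.Str.strip chunk)) none (some L)) []).foldl
            (fun cov name => PySem.Set.add cov name) cov) cov) cov ↔
      c ∈ cov ∨ ∃ chunk ∈ chunks, ¬ (PySem.Str.upper (PySem.Str.strip chunk) = "") ∧
        ∃ L ∈ pvLengths, c ∈ PySem.Dict.getD pvIndex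
          (PySem.Str.slice (PySem.Str.upper (PySem.Str.strip chunk)) none (some L)) [] := by
  induction chunks generalizing cov with
  | nil => simp
  | cons ch chs ih =>
    rw [List.foldl_cons]
    by_cases h : PySem.Str.upper (PySem.Str.strip ch) = ""
    · rw [if_pos h, ih]
      constructor
      · rintro (hc | ⟨chunk, hm, hx⟩)
        · exact Or.inl hc
        · exact Or.inr ⟨chunk, List.mem_cons_of_mem _ hm, hx⟩
      · rintro (hc | ⟨chunk, hm, hne, hx⟩)
        · exact Or.inl hc
        · rcases List.mem_cons.mp hm with rfl | hm
          · exact absurd h hne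
          · exact Or.inr ⟨chunk, hm, hne, hx⟩
    · rw [if_neg h, ih, pv_mem_len_fold]
      constructor
      · rintro ((hc | hx) | ⟨chunk, hm, hx⟩)
        · exact Or.inl hc
        · exact Or.inr ⟨ch, List.mem_cons_self, h, hx⟩
        · exact Or.inr ⟨chunk, List.mem_cons_of_mem _ hm, hx⟩
      · rintro (hc | ⟨chunk, hm, hne, hx⟩)
        · exact Or.inl (Or.inl hc)
        · rcases List.mem_cons.mp hm with rfl | hm
          · exact Or.inl (Or.inr hx)
          · exact Or.inr ⟨chunk, hm, hne, hx⟩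

-- the per-concept coverage test: index lookups at all lengths ≡ A's prefix scan
theorem pv_cover_iff (c : String) (eps : List String)
    (h : (c, eps) ∈ PySem.Dict.items CONCEPT_TO_ICD_PREFIX) (code : String) :
    (∃ L ∈ pvLengths, c ∈ PySem.Dict.getD pvIndex (PySem.Str.slice code none (some L)) []) ↔
      pvHit eps code = true := by
  rw [pvLengths_eq]
  constructor
  · rintro ⟨L, hL, hmem⟩
    rw [pv_mem_index] at hmem
    obtain ⟨⟨k, v⟩, hnp, hfst, p, hp, hup⟩ := factBwd _ hmem
    simp only at hfst hup
    subst hfst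
    have h1 := PySem.Dict.get?_of_mem_items _ hnp tableKeysNodup
    have h2 := PySem.Dict.get?_of_mem_items _ h tableKeysNodup
    injection h2.symm.trans h1 with hv
    unfold pvHit
    rw [List.any_eq_true]
    have hL0 : 0 ≤ L := by
      simp only [List.mem_cons, List.not_mem_nil, or_false] at hL
      rcases hL with rfl | rfl | rfl <;> norm_num
    refine ⟨p, hv ▸ hp, ?_⟩
    rw [hup]
    exact pv_slice_sw code L hL0
  · intro hhit
    unfold pvHit at hhit
    rw [List.any_eq_true] at hhit
    obtain ⟨p, hp, hsw⟩ := hhit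
    have hpair : (PySem.Str.upper p, c) ∈ pvPairs := factFwd _ h p hp
    have hlen := factLen _ hpair
    rw [pvLengths_eq] at hlen
    refine ⟨PySem.Str.len (PySem.Str.upper p), hlen, ?_⟩
    rw [pv_mem_index, pv_sw_slice code (PySem.Str.upper p) hsw]
    exact hpair

-- c is a known concept name iff it is a key of A's table
theorem pv_known_iff (c : String) :
    c ∈ pvKnown ↔ ∃ eps, (c, eps) ∈ PySem.Dict.items CONCEPT_TO_ICD_PREFIX := by
  unfold pvKnown
  rw [PySem.Set.mem_ofList, List.mem_map]
  constructor
  · rintro ⟨⟨q, c'⟩, hm, rfl⟩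
    obtain ⟨⟨k, v⟩, hnp, hfst, -⟩ := factBwd _ hm
    simp only at hfst
    subst hfst
    exact ⟨v, hnp⟩
  · rintro ⟨eps, hm⟩
    obtain ⟨p, hp⟩ := List.exists_mem_of_ne_nil _ (factNonempty _ hm)
    exact ⟨(PySem.Str.upper p, c), factFwd _ hm p hp, rfl⟩

-- A's loop body as a single boolean test
theorem stepA_eq (documented : List String) :
    stepA documented = fun missing concept =>
      if !(PySem.Dict.getD CONCEPT_TO_ICD_PREFIX concept []).isEmpty &&
         !(documented.any (fun doc => pvHit (PySem.Dict.getD CONCEPT_TO_ICD_PREFIX concept []) doc))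
      then missing ++ [concept] else missing := by
  funext missing concept
  unfold stepA
  by_cases h1 : PySem.Dict.getD CONCEPT_TO_ICD_PREFIX concept [] = []
  · simp [h1]
  · rcases Bool.eq_false_or_eq_true
      (documented.any (fun doc => pvHit (PySem.Dict.getD CONCEPT_TO_ICD_PREFIX concept []) doc)) with h2 | h2
    · simp [h1, h2]
    · simp [h2]

-- ===== VERDICT (by name: the statement is the Claim_ definition above) =====
theorem find_missing_concepts_spec : Claim_equal_find_missing_concepts := by
  intro concepts icd_codes_str _
  unfold Spec_find_missing_concepts find_missing_concepts find_missing_concepts_alt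
  by_cases hs : icd_codes_str = ""
  · simp [hs]
  · simp only [hs, if_false]
    rw [stepA_eq, PySem.List.foldl_append_if_eq_filter, List.nil_append]
    apply List.filter_congr
    intro c _
    have hcovered : ∀ eps, (c, eps) ∈ PySem.Dict.items CONCEPT_TO_ICD_PREFIX →
        PySem.Set.contains (((PySem.Str.split? icd_codes_str ";").getD []).foldl
          (fun cov chunk =>
            if PySem.Str.upper (PySem.Str.strip chunk) = "" then cov
            else pvLengths.foldl (fun cov L =>
              (PySem.Dict.getD pvIndex
                (PySem.Str.slice (PySem.Str.upper (PySem.Str.strip chunk)) none (some L)) []).foldl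
                (fun cov name => PySem.Set.add cov name) cov) cov) PySem.Set.empty) c =
          (pvNormalize icd_codes_str).any (fun doc => pvHit eps doc) := by
      intro eps hitems
      have hiff : c ∈ ((PySem.Str.split? icd_codes_str ";").getD []).foldl
          (fun cov chunk =>
            if PySem.Str.upper (PySem.Str.strip chunk) = "" then cov
            else pvLengths.foldl (fun cov L =>
              (PySem.Dict.getD pvIndex
                (PySem.Str.slice (PySem.Str.upper (PySem.Str.strip chunk)) none (some L)) []).foldl
                (fun cov name => PySem.Set.add cov name) cov) cov) PySem.Set.empty ↔
          (pvNormalize icd_codes_str).any (fun doc => pvHit eps doc) = true := by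
        rw [pv_mem_chunk_fold]
        simp only [PySem.Set.empty, List.not_mem_nil, false_or]
        unfold pvNormalize
        rw [List.any_eq_true]
        constructor
        · rintro ⟨chunk, hm, hne', L, hL, hmem⟩
          refine ⟨PySem.Str.upper (PySem.Str.strip chunk), ?_, ?_⟩
          · rw [List.mem_map]
            refine ⟨chunk, ?_, rfl⟩
            rw [List.mem_filter]
            refine ⟨hm, ?_⟩
            simpa [pv_upper_eq_empty] using hne'
          · exact (pv_cover_iff c eps hitems _).mp ⟨L, hL, hmem⟩
        · rintro ⟨doc, hdoc, hhit⟩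
          rw [List.mem_map] at hdoc
          obtain ⟨chunk, hcf, rfl⟩ := hdoc
          rw [List.mem_filter] at hcf
          obtain ⟨hm, hstrip⟩ := hcf
          refine ⟨chunk, hm, ?_, ?_⟩
          · rw [pv_upper_eq_empty]
            simpa using hstrip
          · exact (pv_cover_iff c eps hitems _).mpr hhit
      rw [pv_contains_eq]
      rcases Bool.eq_false_or_eq_true
          ((pvNormalize icd_codes_str).any (fun doc => pvHit eps doc)) with ha | ha
      all_goals rw [ha]
      · rw [decide_eq_true_eq]
        exact hiff.mpr ha
      · rw [decide_eq_false_iff_not]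
        intro hc
        rw [hiff, ha] at hc
        exact Bool.false_ne_true hc
    cases hget : PySem.Dict.get? CONCEPT_TO_ICD_PREFIX c with
    | none =>
      have hgd : PySem.Dict.getD CONCEPT_TO_ICD_PREFIX c [] = [] := by
        rw [PySem.Dict.getD_eq_get?_getD, hget]; rfl
      have hkn : PySem.Set.contains pvKnown c = false := by
        rw [pv_contains_eq, decide_eq_false_iff_not]
        intro hk
        obtain ⟨eps, hm⟩ := (pv_known_iff c).mp hk
        have := PySem.Dict.get?_of_mem_items _ hm tableKeysNodup
        rw [hget] at this
        simp at this
      rw [hgd, hkn]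
      simp
    | some eps =>
      have hitems : (c, eps) ∈ PySem.Dict.items CONCEPT_TO_ICD_PREFIX :=
        PySem.Dict.mem_items_of_get?_eq_some _ hget
      have hgd : PySem.Dict.getD CONCEPT_TO_ICD_PREFIX c [] = eps := by
        rw [PySem.Dict.getD_eq_get?_getD, hget]; rfl
      have hne : eps.isEmpty = false := by
        cases heps : eps with
        | nil => exact absurd heps (factNonempty _ hitems)
        | cons a l => rfl
      have hkn : PySem.Set.contains pvKnown c = true := by
        rw [pv_contains_eq, decide_eq_true_eq]
        exact (pv_known_iff c).mpr ⟨eps, hitems⟩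
      rw [hgd, hne, hkn, hcovered eps hitems]
      simp
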